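-- pv_equiv track=rewrite | github.com/apprentice10/webserver | engine/etl_compiler.py | _sqlite_split_part
-- ===== SOURCE A (Python) =====
-- def _sqlite_split_part(s: str, d: str, n: int) -> str:
--     """Recursively build nested SQLite SQL to extract the nth delimiter-token from s."""
--     if n == 1:
--         return (
--             f"CASE WHEN INSTR({s}, {d}) > 0 "
--             f"THEN SUBSTR({s}, 1, INSTR({s}, {d}) - 1) "
--             f"ELSE {s} END"
--         )
--     rest = f"SUBSTR({s}, INSTR({s}, {d}) + LENGTH({d}))"
--     return _sqlite_split_part(rest, d, n - 1)
-- ===== SOURCE B (Python) =====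
-- def _sqlite_split_part(s: str, d: str, n: int) -> str:
--     """Iteratively build nested SQLite SQL to extract the nth delimiter-token from s."""
--     cur = s
--     for _ in range(n - 1):
--         cur = "SUBSTR({0}, INSTR({0}, {1}) + LENGTH({1}))".format(cur, d)
--     return (
--         "CASE WHEN INSTR({0}, {1}) > 0 "
--         "THEN SUBSTR({0}, 1, INSTR({0}, {1}) - 1) "
--         "ELSE {0} END"
--     ).format(cur, d)
-- ===== Notes on version B (the rewrite author's own statement) =====
-- stated objective: simpler
-- what changed: Replaced A's tail recursion by an iterative loop that wraps the inner SUBSTR expression n-1 times and then emits the CASE expression once; Pre_ requires n >= 1 because A never returns for n <= 0 (unbounded recursion with exponentially growing strings).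
import Mathlib
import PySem

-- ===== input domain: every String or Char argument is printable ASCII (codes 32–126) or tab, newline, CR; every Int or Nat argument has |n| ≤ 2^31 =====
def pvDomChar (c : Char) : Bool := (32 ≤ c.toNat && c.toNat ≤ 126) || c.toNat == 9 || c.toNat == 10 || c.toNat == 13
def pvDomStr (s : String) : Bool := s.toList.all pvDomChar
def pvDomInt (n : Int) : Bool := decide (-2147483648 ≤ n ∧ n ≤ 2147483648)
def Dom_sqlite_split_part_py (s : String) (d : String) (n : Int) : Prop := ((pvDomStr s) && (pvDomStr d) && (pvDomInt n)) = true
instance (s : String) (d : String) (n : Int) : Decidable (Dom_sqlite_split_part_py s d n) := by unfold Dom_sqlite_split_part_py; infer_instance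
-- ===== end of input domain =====

-- B replaces A's tail recursion by an iterative range-loop over an accumulator (same SQL string); simpler decomposition.

-- ===== PORT A =====
-- A's f-string for the n == 1 CASE expression
def pvCaseExpr (s : String) (d : String) : String :=
  "CASE WHEN INSTR(" ++ s ++ ", " ++ d ++ ") > 0 " ++
  "THEN SUBSTR(" ++ s ++ ", 1, INSTR(" ++ s ++ ", " ++ d ++ ") - 1) " ++
  "ELSE " ++ s ++ " END"

-- A's f-string for the 'rest' expression
def pvRestExpr (s : String) (d : String) : String :=
  "SUBSTR(" ++ s ++ ", INSTR(" ++ s ++ ", " ++ d ++ ") + LENGTH(" ++ d ++ "))"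

-- A's recursion with the countdown n carried as a Nat (for n >= 1 this is exactly
-- A's call chain; for n <= 0 Python A never returns, outside Pre_).
def pvGoA (s : String) (d : String) : Nat → String
  | 0 => s            -- unreachable under Pre_ (n >= 1)
  | 1 => pvCaseExpr s d
  | Nat.succ (Nat.succ m) => pvGoA (pvRestExpr s d) d (Nat.succ m)

def sqlite_split_part_py (s : String) (d : String) (n : Int) : String :=
  pvGoA s d n.toNat

-- ===== PORT B =====
-- B: cur = s; 'for _ in range(n - 1)' folds the .format template over cur; one final CASE template.
def sqlite_split_part_py_alt (s : String) (d : String) (n : Int) : String :=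
  let cur := (PySem.List.pyRange 0 (n - 1) 1).foldl
    (fun c _ => "SUBSTR(" ++ c ++ ", INSTR(" ++ c ++ ", " ++ d ++ ") + LENGTH(" ++ d ++ "))") s
  "CASE WHEN INSTR(" ++ cur ++ ", " ++ d ++ ") > 0 " ++
  "THEN SUBSTR(" ++ cur ++ ", 1, INSTR(" ++ cur ++ ", " ++ d ++ ") - 1) " ++
  "ELSE " ++ cur ++ " END"

-- ===== PRECONDITION & SPEC =====
-- Pre_ excludes n <= 0, on which Python A recurses without a base case and never returns normally.
def Pre_sqlite_split_part_py (s : String) (d : String) (n : Int) : Prop := 1 ≤ n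
instance (s : String) (d : String) (n : Int) : Decidable (Pre_sqlite_split_part_py s d n) := by unfold Pre_sqlite_split_part_py; infer_instance

def pvWitness_sqlite_split_part_py : String × String × Int := ("col", "','", 3)

def Spec_sqlite_split_part_py (s : String) (d : String) (n : Int) (out : String) : Prop := out = sqlite_split_part_py_alt s d n
instance (s : String) (d : String) (n : Int) (out : String) : Decidable (Spec_sqlite_split_part_py s d n out) := by unfold Spec_sqlite_split_part_py; infer_instance

-- ===== CLAIM =====
def Claim_equal_sqlite_split_part_py : Prop := ∀ (s : String) (d : String) (n : Int), Dom_sqlite_split_part_py s d n → Pre_sqlite_split_part_py s d n → Spec_sqlite_split_part_py s d n (sqlite_split_part_py s d n)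

-- ===== LEMMAS AND PROOFS =====
-- Folding B's constant wrapper over any list only counts its length.
theorem pvFold_const_len (d : String) : ∀ (l : List Int) (s : String),
    l.foldl (fun c _ => "SUBSTR(" ++ c ++ ", INSTR(" ++ c ++ ", " ++ d ++ ") + LENGTH(" ++ d ++ "))") s
      = (fun c => pvRestExpr c d)^[l.length] s := by
  intro l
  induction l with
  | nil => intro s; simp
  | cons x xs ih =>
      intro s
      simp only [List.foldl_cons, List.length_cons, ih, Function.iterate_succ_apply, pvRestExpr]

-- A's call chain of length k+1 equals k wrappings followed by one CASE.
theorem pvGoA_eq_iter (d : String) : ∀ (k : Nat) (s : String),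
    pvGoA s d (k + 1) = pvCaseExpr ((fun c => pvRestExpr c d)^[k] s) d := by
  intro k
  induction k with
  | zero => intro s; simp [pvGoA]
  | succ m ih =>
      intro s
      show pvGoA (pvRestExpr s d) d (m + 1) = _
      rw [ih (pvRestExpr s d), Function.iterate_succ_apply]

-- ===== VERDICT =====
theorem sqlite_split_part_py_spec : Claim_equal_sqlite_split_part_py := by
  intro s d n _ hn
  have hn1 : 1 ≤ n := hn
  unfold Spec_sqlite_split_part_py sqlite_split_part_py sqlite_split_part_py_alt
  rw [pvFold_const_len, PySem.List.length_pyRange_one]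
  have h : n.toNat = (n - 1).toNat + 1 := by omega
  rw [h, pvGoA_eq_iter, pvCaseExpr]
  simp
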